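-- pv_equiv track=rewrite | github.com/mpresident14/Projects | Python/WordStreak/WordStreak.py | lengthScore
-- ===== SOURCE A (Python) =====
-- def lengthScore(word):
--     """returns the value of a word based on its length"""
--     score = 0
--     if len(word) <= 3:
--         return 0
--     if len(word) >= 4:
--         score += 2
--     if len(word) >= 5:
--         score += 3
--
--         for i in range(5, len(word)):
--             score += 5
--     return score
-- ===== SOURCE B (Python) =====
-- def lengthScore(word):
--     """returns the value of a word based on its length"""
--     n = len(word)
--     if n <= 3:
--         return 0
--     if n == 4:
--         return 2
--     return 5 * (n - 4)
-- ===== Notes on version B (the rewrite author's own statement) =====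
-- stated objective: simpler
-- what changed: Replaces the accumulator with if-cascade plus a range loop by a direct closed-form arithmetic expression (0 / 2 / 5*(len-4)).
import Mathlib
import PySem

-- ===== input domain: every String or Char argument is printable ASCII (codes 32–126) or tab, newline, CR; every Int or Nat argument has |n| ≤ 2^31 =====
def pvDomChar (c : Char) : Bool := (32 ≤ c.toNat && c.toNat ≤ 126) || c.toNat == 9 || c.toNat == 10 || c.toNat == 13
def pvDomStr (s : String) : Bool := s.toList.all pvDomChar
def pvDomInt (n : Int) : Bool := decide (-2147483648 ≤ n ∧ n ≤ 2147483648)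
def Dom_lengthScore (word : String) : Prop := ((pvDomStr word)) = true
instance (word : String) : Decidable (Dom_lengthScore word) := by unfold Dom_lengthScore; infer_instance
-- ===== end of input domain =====

-- B replaces A's accumulator and range loop by a closed-form expression (simpler).

-- ===== PORT A =====
def lengthScore (word : String) : Int :=
  let score : Int := 0
  if (PySem.Str.len word) ≤ 3 then 0
  else
    let score := if (PySem.Str.len word) ≥ 4 then score + 2 else score
    let score :=
      if (PySem.Str.len word) ≥ 5 then
        let score := score + 3
        (PySem.List.pyRange 5 (PySem.Str.len word) 1).foldl (fun s _ => s + 5) score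
      else score
    score

-- ===== PORT B =====
def lengthScore_alt (word : String) : Int :=
  let n := PySem.Str.len word
  if n ≤ 3 then 0
  else if n = 4 then 2
  else 5 * (n - 4)

-- ===== PRECONDITION & SPEC =====
def Spec_lengthScore (word : String) (out : Int) : Prop := out = lengthScore_alt word
instance (word : String) (out : Int) : Decidable (Spec_lengthScore word out) := by unfold Spec_lengthScore; infer_instance

-- ===== CLAIM =====
def Claim_equal_lengthScore : Prop := ∀ (word : String), Dom_lengthScore word → Spec_lengthScore word (lengthScore word)

-- ===== LEMMAS AND PROOFS =====
theorem foldl_add5 (l : List Int) (s : Int) :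
    l.foldl (fun s _ => s + 5) s = s + 5 * l.length := by
  induction l generalizing s with
  | nil => simp
  | cons a t ih => simp [List.foldl, ih]; ring

-- ===== VERDICT =====
theorem lengthScore_spec : Claim_equal_lengthScore := by
  intro word _
  unfold Spec_lengthScore lengthScore lengthScore_alt
  set n := PySem.Str.len word with hdef
  by_cases h3 : n ≤ 3
  · simp [h3]
  · by_cases h5 : n ≥ 5
    · have h4 : ¬ n = 4 := by omega
      simp only [h3, if_false, ge_iff_le]
      rw [if_pos (by omega : (4:Int) ≤ n), if_pos h5, foldl_add5,
        PySem.List.length_pyRange_one]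
      simp [h4]
      omega
    · have h4 : n = 4 := by
        have : 0 ≤ n := by simp [hdef, PySem.Str.len]
        omega
      simp only [h4]
      norm_num
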